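-- pv_equiv track=rewrite | github.com/atulmishra84/CTComlySphere | scanners/graphql_scanner.py | determine_service_type_from_schema
-- ===== SOURCE A (Python) =====
-- def determine_service_type_from_schema(schema):
--     """Determine AI service type from GraphQL schema"""
--     types = schema.get('types', [])
--     type_names = [t.get('name', '').lower() for t in types]
--
--     # Check for specific healthcare AI patterns
--     if any('imaging' in name or 'radiology' in name for name in type_names):
--         return 'Medical Imaging AI'
--     elif any('clinical' in name or 'diagnosis' in name for name in type_names):
--         return 'Clinical Decision Support'
--     elif any('drug' in name or 'pharmaceutical' in name for name in type_names):
--         return 'Drug Discovery AI'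
--     elif any('patient' in name and 'monitor' in name for name in type_names):
--         return 'Patient Monitoring AI'
--     else:
--         return 'Healthcare AI GraphQL Service'
-- ===== SOURCE B (Python) =====
-- LABELS = ['Medical Imaging AI', 'Clinical Decision Support', 'Drug Discovery AI',
--           'Patient Monitoring AI', 'Healthcare AI GraphQL Service']
--
-- def _rank(name):
--     """Priority index of the highest-priority category this single name matches (4 = none)."""
--     if 'imaging' in name or 'radiology' in name:
--         return 0
--     if 'clinical' in name or 'diagnosis' in name:
--         return 1
--     if 'drug' in name or 'pharmaceutical' in name:
--         return 2
--     if 'patient' in name and 'monitor' in name: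
--         return 3
--     return 4
--
-- def determine_service_type_from_schema(schema):
--     """Determine AI service type: min over per-name priority ranks, indexed into a label table.
--
--     Correct because the first category (in priority order) matched by SOME name
--     is exactly the minimum, over all names, of each name's own best category rank."""
--     best = 4
--     for t in schema.get('types', []):
--         best = min(best, _rank(t.get('name', '').lower()))
--     return LABELS[best]
-- ===== Notes on version B (the rewrite author's own statement) =====
-- stated objective: alternative
-- what changed: Replaces the global if/elif chain of any()-scans with a rank-and-reduce scheme: each name is mapped to a numeric priority rank (0-4), the ranks are reduced with min over one pass, and the answer is a table lookup LABELS[min]; correct because the first category matched by some name equals the minimum per-name rank.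
import Mathlib
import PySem

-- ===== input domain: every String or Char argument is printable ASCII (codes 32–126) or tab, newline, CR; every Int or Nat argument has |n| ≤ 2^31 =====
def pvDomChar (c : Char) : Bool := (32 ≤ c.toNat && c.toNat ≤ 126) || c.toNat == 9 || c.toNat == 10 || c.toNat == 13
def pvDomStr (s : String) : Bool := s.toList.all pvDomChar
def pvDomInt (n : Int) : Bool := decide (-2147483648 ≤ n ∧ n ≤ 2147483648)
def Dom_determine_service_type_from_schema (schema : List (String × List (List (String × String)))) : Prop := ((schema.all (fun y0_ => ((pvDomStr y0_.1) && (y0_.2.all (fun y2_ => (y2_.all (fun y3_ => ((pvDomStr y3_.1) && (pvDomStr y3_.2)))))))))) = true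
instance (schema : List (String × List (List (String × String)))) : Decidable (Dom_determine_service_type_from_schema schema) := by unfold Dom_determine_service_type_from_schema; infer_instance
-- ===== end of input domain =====

-- B replaces A's if/elif chain of any()-scans by a rank-and-reduce: each name gets a priority rank 0-4, ranks are min-reduced in one pass and index a label table (alternative algorithm, same cost).


-- ===== PORT A =====
def determine_service_type_from_schema (schema : List (String × List (List (String × String)))) : String :=
  let types := PySem.Dict.getD (PySem.Dict.mk schema) "types" []
  let type_names := types.map (fun t => PySem.Str.lower (PySem.Dict.getD (PySem.Dict.mk t) "name" ""))
  if type_names.any (fun name => PySem.Str.isIn "imaging" name || PySem.Str.isIn "radiology" name) then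
    "Medical Imaging AI"
  else if type_names.any (fun name => PySem.Str.isIn "clinical" name || PySem.Str.isIn "diagnosis" name) then
    "Clinical Decision Support"
  else if type_names.any (fun name => PySem.Str.isIn "drug" name || PySem.Str.isIn "pharmaceutical" name) then
    "Drug Discovery AI"
  else if type_names.any (fun name => PySem.Str.isIn "patient" name && PySem.Str.isIn "monitor" name) then
    "Patient Monitoring AI"
  else
    "Healthcare AI GraphQL Service"

-- ===== PORT B =====
def pvLabels : List String :=
  ["Medical Imaging AI", "Clinical Decision Support", "Drug Discovery AI",
   "Patient Monitoring AI", "Healthcare AI GraphQL Service"]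

-- per-name priority rank (Python helper _rank)
def pvRankName (name : String) : Nat :=
  if PySem.Str.isIn "imaging" name || PySem.Str.isIn "radiology" name then 0
  else if PySem.Str.isIn "clinical" name || PySem.Str.isIn "diagnosis" name then 1
  else if PySem.Str.isIn "drug" name || PySem.Str.isIn "pharmaceutical" name then 2
  else if PySem.Str.isIn "patient" name && PySem.Str.isIn "monitor" name then 3
  else 4

def determine_service_type_from_schema_alt (schema : List (String × List (List (String × String)))) : String :=
  let best := (PySem.Dict.getD (PySem.Dict.mk schema) "types" []).foldl
    (fun best t => min best (pvRankName (PySem.Str.lower (PySem.Dict.getD (PySem.Dict.mk t) "name" "")))) 4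
  pvLabels.getD best ""

-- ===== PRECONDITION & SPEC =====
def Spec_determine_service_type_from_schema (schema : List (String × List (List (String × String)))) (out : String) : Prop := out = determine_service_type_from_schema_alt schema
instance (schema : List (String × List (List (String × String)))) (out : String) : Decidable (Spec_determine_service_type_from_schema schema out) := by unfold Spec_determine_service_type_from_schema; infer_instance

-- ===== CLAIM (what is proved, stated in full; the proofs are below) =====
def Claim_equal_determine_service_type_from_schema : Prop := ∀ (schema : List (String × List (List (String × String)))), Dom_determine_service_type_from_schema schema → Spec_determine_service_type_from_schema schema (determine_service_type_from_schema schema)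

-- ===== LEMMAS AND PROOFS =====

-- generic rank / chain value and their relation
def pvRank {α : Type} (p0 p1 p2 p3 : α → Bool) (t : α) : Nat :=
  if p0 t then 0 else if p1 t then 1 else if p2 t then 2 else if p3 t then 3 else 4

def pvChain {α : Type} (p0 p1 p2 p3 : α → Bool) (l : List α) : Nat :=
  if l.any p0 then 0 else if l.any p1 then 1 else if l.any p2 then 2
  else if l.any p3 then 3 else 4

theorem pvChain_le {α : Type} (p0 p1 p2 p3 : α → Bool) (l : List α) :
    pvChain p0 p1 p2 p3 l ≤ 4 := by
  unfold pvChain; split_ifs <;> omega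

theorem pvChain_cons {α : Type} (p0 p1 p2 p3 : α → Bool) (x : α) (l : List α) :
    pvChain p0 p1 p2 p3 (x :: l) = min (pvRank p0 p1 p2 p3 x) (pvChain p0 p1 p2 p3 l) := by
  simp only [pvChain, pvRank, List.any_cons, Bool.or_eq_true]
  split_ifs <;> simp_all

theorem pvFold_min {α : Type} (p0 p1 p2 p3 : α → Bool) (l : List α) (m : Nat)
    (hm : m ≤ 4) :
    l.foldl (fun b t => min b (pvRank p0 p1 p2 p3 t)) m = min m (pvChain p0 p1 p2 p3 l) := by
  induction l generalizing m with
  | nil =>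
    simp [pvChain]; omega
  | cons x xs ih =>
    rw [List.foldl_cons, ih _ (le_trans (min_le_left _ _) hm), pvChain_cons, min_assoc]

-- ===== VERDICT (by name: the statement is the Claim_ definition above) =====
theorem determine_service_type_from_schema_spec : Claim_equal_determine_service_type_from_schema := by
  intro schema _
  unfold Spec_determine_service_type_from_schema
  unfold determine_service_type_from_schema determine_service_type_from_schema_alt
  have hrank : ∀ (t : List (String × String)),
      pvRankName (PySem.Str.lower (PySem.Dict.getD (PySem.Dict.mk t) "name" "")) =
      pvRank (fun t => PySem.Str.isIn "imaging" (PySem.Str.lower (PySem.Dict.getD (PySem.Dict.mk t) "name" "")) || PySem.Str.isIn "radiology" (PySem.Str.lower (PySem.Dict.getD (PySem.Dict.mk t) "name" "")))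
             (fun t => PySem.Str.isIn "clinical" (PySem.Str.lower (PySem.Dict.getD (PySem.Dict.mk t) "name" "")) || PySem.Str.isIn "diagnosis" (PySem.Str.lower (PySem.Dict.getD (PySem.Dict.mk t) "name" "")))
             (fun t => PySem.Str.isIn "drug" (PySem.Str.lower (PySem.Dict.getD (PySem.Dict.mk t) "name" "")) || PySem.Str.isIn "pharmaceutical" (PySem.Str.lower (PySem.Dict.getD (PySem.Dict.mk t) "name" "")))
             (fun t => PySem.Str.isIn "patient" (PySem.Str.lower (PySem.Dict.getD (PySem.Dict.mk t) "name" "")) && PySem.Str.isIn "monitor" (PySem.Str.lower (PySem.Dict.getD (PySem.Dict.mk t) "name" ""))) t := by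
    intro t; rfl
  simp only [hrank, List.any_map, Function.comp_def]
  rw [pvFold_min _ _ _ _ _ _ (le_refl 4)]
  have hle := pvChain_le
    (fun t => PySem.Str.isIn "imaging" (PySem.Str.lower (PySem.Dict.getD (PySem.Dict.mk t) "name" "")) || PySem.Str.isIn "radiology" (PySem.Str.lower (PySem.Dict.getD (PySem.Dict.mk t) "name" "")))
    (fun t => PySem.Str.isIn "clinical" (PySem.Str.lower (PySem.Dict.getD (PySem.Dict.mk t) "name" "")) || PySem.Str.isIn "diagnosis" (PySem.Str.lower (PySem.Dict.getD (PySem.Dict.mk t) "name" "")))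
    (fun t => PySem.Str.isIn "drug" (PySem.Str.lower (PySem.Dict.getD (PySem.Dict.mk t) "name" "")) || PySem.Str.isIn "pharmaceutical" (PySem.Str.lower (PySem.Dict.getD (PySem.Dict.mk t) "name" "")))
    (fun t => PySem.Str.isIn "patient" (PySem.Str.lower (PySem.Dict.getD (PySem.Dict.mk t) "name" "")) && PySem.Str.isIn "monitor" (PySem.Str.lower (PySem.Dict.getD (PySem.Dict.mk t) "name" "")))
    (PySem.Dict.getD (PySem.Dict.mk schema) "types" [])
  rw [min_eq_right hle]
  unfold pvChain
  split_ifs <;> rfl
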